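-- pv_equiv track=rewrite | github.com/aktivx/CS106A-Python | S3-greatest_common_divisor.py | lowest_common_multiple
-- ===== SOURCE A (Python) =====
-- def lowest_common_multiple(a, b):
--     """
--     Return the lowest common multiple of a and b.
--
--     >>> lowest_common_multiple(2, 12)
--     12
--     >>> lowest_common_multiple(13, 3)
--     39
--     >>> lowest_common_multiple(3, 6)
--     6
--     >>> lowest_common_multiple(1, 3)
--     3
--     >>> lowest_common_multiple(6, 9)
--     18
--     """
--     if a <= b:
--         higher = b
--     else:
--         higher = a
--
--     for i in range(higher, (a * b) + 1):
--         if i % a == 0 and i % b == 0: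
--             lcm = i
--             break
--     return lcm
-- ===== SOURCE B (Python) =====
-- def lowest_common_multiple(a, b):
--     # Euclidean algorithm instead of scanning every candidate multiple.
--     x, y = abs(a), abs(b)
--     while y:
--         x, y = y, x % y
--     return abs(a * b) // x if x else 0
-- ===== Notes on version B (the rewrite author's own statement) =====
-- stated objective: faster
-- what changed: Replaces the linear scan over all candidates from max(a,b) to a*b with the Euclidean algorithm and the identity lcm(a,b) = |a*b| / gcd(a,b).
-- outside the precondition, e.g. on lowest_common_multiple(-2, -4): A returns 0, B returns 4; on lowest_common_multiple(-3, -3): A returns -3, B returns 3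
import Mathlib
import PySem

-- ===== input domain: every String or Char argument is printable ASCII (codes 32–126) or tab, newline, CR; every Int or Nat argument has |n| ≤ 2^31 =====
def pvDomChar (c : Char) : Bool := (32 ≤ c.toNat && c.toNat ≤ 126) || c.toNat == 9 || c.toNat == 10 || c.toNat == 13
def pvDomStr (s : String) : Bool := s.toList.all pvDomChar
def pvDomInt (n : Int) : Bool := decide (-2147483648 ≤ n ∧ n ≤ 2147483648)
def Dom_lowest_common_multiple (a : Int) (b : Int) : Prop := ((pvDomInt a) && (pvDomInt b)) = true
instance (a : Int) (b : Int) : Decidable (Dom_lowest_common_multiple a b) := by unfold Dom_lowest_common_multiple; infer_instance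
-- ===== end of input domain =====

-- B replaces A's linear scan from max(a,b) to a*b with the Euclidean algorithm (lcm = |a*b| / gcd): asymptotically faster.

-- ===== PORT A =====
-- `for i in range(higher, a*b+1): if …: lcm = i; break` ported as a recursion on i that stops at the
-- first hit, exactly like Python's loop; falling off the range end is Python's UnboundLocalError
-- (excluded by Pre_), where the port returns 0 only to be total.
def lcmScan (a : Int) (b : Int) (i : Int) (stop : Int) : Int :=
  if h : i < stop then
    if PySem.Int.mod i a == 0 && PySem.Int.mod i b == 0 then i
    else lcmScan a b (i + 1) stop
  else 0
termination_by (stop - i).toNat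
decreasing_by omega

def lowest_common_multiple (a : Int) (b : Int) : Int :=
  let higher : Int := if a ≤ b then b else a
  lcmScan a b higher (a * b + 1)

-- ===== PORT B =====
-- transliteration of Source B's hand-written Euclidean loop `while y: x, y = y, x % y`
def pvGcd (x y : Nat) : Nat :=
  if h : y = 0 then x else pvGcd y (x % y)
termination_by y
decreasing_by exact Nat.mod_lt x (Nat.pos_of_ne_zero h)

def lowest_common_multiple_alt (a : Int) (b : Int) : Int :=
  let x := pvGcd a.natAbs b.natAbs
  if x ≠ 0 then ((a * b).natAbs / x : Nat) else 0

-- ===== PRECONDITION & SPEC =====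
-- Pre_ restricts to positive arguments, the function's natural domain (its doctests): A raises on a zero
-- or mixed-sign input (empty scan range / % by zero), and on two negative arguments A's value (0, or a
-- when |a| = |b|) is an accident of starting the scan at the negative max(a,b); B returns the standard
-- nonnegative lcm there (see cites in the claim).
def Pre_lowest_common_multiple (a : Int) (b : Int) : Prop := 1 ≤ a ∧ 1 ≤ b
instance (a : Int) (b : Int) : Decidable (Pre_lowest_common_multiple a b) := by unfold Pre_lowest_common_multiple; infer_instance
def pvWitness_lowest_common_multiple : Int × Int := (6, 9)

def Spec_lowest_common_multiple (a : Int) (b : Int) (out : Int) : Prop := out = lowest_common_multiple_alt a b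
instance (a : Int) (b : Int) (out : Int) : Decidable (Spec_lowest_common_multiple a b out) := by unfold Spec_lowest_common_multiple; infer_instance

-- ===== CLAIM (what is proved, stated in full; the proofs are below) =====
def Claim_equal_lowest_common_multiple : Prop := ∀ (a : Int) (b : Int), Dom_lowest_common_multiple a b → Pre_lowest_common_multiple a b → Spec_lowest_common_multiple a b (lowest_common_multiple a b)

-- ===== LEMMAS AND PROOFS =====

-- the hand-written Euclid is Nat.gcd
theorem pvGcd_eq (x y : Nat) : pvGcd x y = Nat.gcd x y := by
  induction y using Nat.strong_induction_on generalizing x with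
  | _ y ih =>
    rw [pvGcd]
    split
    · subst ‹y = 0›; simp
    · rw [ih (x % y) (Nat.mod_lt x (Nat.pos_of_ne_zero ‹y ≠ 0›)) y]
      rw [Nat.gcd_comm y (x % y), ← Nat.gcd_rec y x, Nat.gcd_comm]

-- find? over pyRange: if L is in the range, satisfies p, and nothing before it does, find? = some L
theorem find?_pyRange_eq (p : Int → Bool) (lo hi L : Int) (hlo : lo ≤ L) (hL : L < hi)
    (hp : p L = true) (hmin : ∀ i, lo ≤ i → i < L → p i = false) :
    (PySem.List.pyRange lo hi 1).find? p = some L := by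
  rw [PySem.List.pyRange_one_append lo L hi hlo (by omega), List.find?_append]
  have h1 : (PySem.List.pyRange lo L 1).find? p = none := by
    rw [List.find?_eq_none]
    intro i hi
    rw [PySem.List.mem_pyRange_one] at hi
    rw [hmin i hi.1 hi.2]; exact Bool.false_ne_true
  rw [h1, PySem.List.pyRange_one_cons (by omega : L < hi)]
  simp [List.find?, hp]

-- lcmScan returns the first element of range(i, stop) passing the test, when one exists
theorem lcmScan_find (a b : Int) (i stop L : Int)
    (hfind : (PySem.List.pyRange i stop 1).find?
      (fun j => PySem.Int.mod j a == 0 && PySem.Int.mod j b == 0) = some L) :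
    lcmScan a b i stop = L := by
  by_cases h : i < stop
  · rw [PySem.List.pyRange_one_cons h, List.find?_cons] at hfind
    rw [lcmScan, dif_pos h]
    split
    · rename_i hp
      rw [hp] at hfind
      exact (Option.some.inj hfind)
    · rename_i hp
      rw [Bool.not_eq_true] at hp
      rw [hp] at hfind
      exact lcmScan_find a b (i + 1) stop L hfind
  · rw [PySem.List.pyRange_one_eq_nil (by omega)] at hfind
    simp at hfind
termination_by (stop - i).toNat
decreasing_by omega

theorem lcm_main (a b : Int) (ha : 1 ≤ a) (hb : 1 ≤ b) :
    lowest_common_multiple a b = lowest_common_multiple_alt a b := by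
  set L : Int := (Nat.lcm a.natAbs b.natAbs : Int) with hLdef
  have haL : a ∣ L :=
    (Int.natAbs_dvd).mp (Int.natCast_dvd_natCast.mpr (Nat.dvd_lcm_left a.natAbs b.natAbs))
  have hbL : b ∣ L :=
    (Int.natAbs_dvd).mp (Int.natCast_dvd_natCast.mpr (Nat.dvd_lcm_right a.natAbs b.natAbs))
  have hLpos : 0 < L := by
    have hna : a.natAbs ≠ 0 := by omega
    have hnb : b.natAbs ≠ 0 := by omega
    rw [hLdef]
    exact_mod_cast Nat.pos_of_ne_zero (Nat.lcm_ne_zero hna hnb)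
  have hLab : L ≤ a * b := by
    have hd : L ∣ a * b := by
      refine Int.dvd_natAbs.mp (Int.natCast_dvd_natCast.mpr ?_)
      rw [Int.natAbs_mul]
      exact Nat.lcm_dvd (Nat.dvd_mul_right _ _) (Nat.dvd_mul_left _ _)
    exact Int.le_of_dvd (by positivity) hd
  have hmaxL : (if a ≤ b then b else a) ≤ L := by
    have h1 : a ≤ L := Int.le_of_dvd hLpos haL
    have h2 : b ≤ L := Int.le_of_dvd hLpos hbL
    split <;> assumption
  have hfind : (PySem.List.pyRange (if a ≤ b then b else a) (a * b + 1) 1).find?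
      (fun i => PySem.Int.mod i a == 0 && PySem.Int.mod i b == 0) = some L := by
    refine find?_pyRange_eq _ _ _ L hmaxL (Int.lt_add_one_iff.mpr hLab) ?_ ?_
    · simp only [Bool.and_eq_true, beq_iff_eq, PySem.Int.mod_eq_zero_iff_dvd]
      exact ⟨haL, hbL⟩
    · intro i hi1 hi2
      have hipos : 0 < i := by split at hi1 <;> omega
      by_contra h
      rw [Bool.not_eq_false, Bool.and_eq_true] at h
      simp only [beq_iff_eq, PySem.Int.mod_eq_zero_iff_dvd] at h
      obtain ⟨hai, hbi⟩ := h
      have hdv : Nat.lcm a.natAbs b.natAbs ∣ i.natAbs :=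
        Nat.lcm_dvd (Int.natAbs_dvd_natAbs.mpr hai) (Int.natAbs_dvd_natAbs.mpr hbi)
      have hLi : L ∣ i := Int.dvd_natAbs.mp (Int.natCast_dvd_natCast.mpr hdv)
      have := Int.le_of_dvd hipos hLi
      omega
  have hA : lowest_common_multiple a b = L := by
    unfold lowest_common_multiple
    exact lcmScan_find a b _ _ L hfind
  have hB : lowest_common_multiple_alt a b = L := by
    unfold lowest_common_multiple_alt
    rw [pvGcd_eq]
    have hg : Nat.gcd a.natAbs b.natAbs ≠ 0 := by
      simp only [ne_eq, Nat.gcd_eq_zero_iff, Int.natAbs_eq_zero, not_and]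
      intro h; omega
    simp only [ne_eq, hg, not_false_iff, if_true]
    rw [Int.natAbs_mul, hLdef, Nat.lcm]
  rw [hA, hB]

-- ===== VERDICT (by name: the statement is the Claim_ definition above) =====
theorem lowest_common_multiple_spec : Claim_equal_lowest_common_multiple := by
  intro a b _ hpre
  unfold Spec_lowest_common_multiple
  exact lcm_main a b hpre.1 hpre.2
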